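-- pv_equiv track=rewrite | github.com/penguinmenac3/ailab | ailab/server/server.py | __ignore
-- ===== SOURCE A (Python) =====
-- from typing import Dict, Any, List, Sequence
--
-- def __ignore(candidate: str, forbidden_list: List[str]) -> bool:
--     # Parse list to find simple placeholder notations
--     start_list = []
--     end_list = []
--     for item in forbidden_list:
--         if item.startswith("*"):
--             end_list.append(item.replace("*", ""))
--         if item.endswith("*"):
--             start_list.append(item.replace("*", ""))
--     # Test
--     res = candidate in forbidden_list
--     for item in start_list:
--         res |= candidate.startswith(item)
--     for item in end_list:
--         res |= candidate.endswith(item)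
--     return res
-- ===== SOURCE B (Python) =====
-- def __ignore(candidate: str, forbidden_list) -> bool:
--     def matches(item: str) -> bool:
--         stripped = item.replace("*", "")
--         return (item == candidate
--                 or (item.startswith("*") and candidate.endswith(stripped))
--                 or (item.endswith("*") and candidate.startswith(stripped)))
--     return any(matches(item) for item in forbidden_list)
-- ===== Notes on version B (the rewrite author's own statement) =====
-- stated objective: simpler
-- what changed: Replaces A's three-phase scheme (build start/end pattern lists, then three separate membership/prefix/suffix scans) with a single any() pass testing each pattern directly against the candidate, with no intermediate lists.
import Mathlib
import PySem

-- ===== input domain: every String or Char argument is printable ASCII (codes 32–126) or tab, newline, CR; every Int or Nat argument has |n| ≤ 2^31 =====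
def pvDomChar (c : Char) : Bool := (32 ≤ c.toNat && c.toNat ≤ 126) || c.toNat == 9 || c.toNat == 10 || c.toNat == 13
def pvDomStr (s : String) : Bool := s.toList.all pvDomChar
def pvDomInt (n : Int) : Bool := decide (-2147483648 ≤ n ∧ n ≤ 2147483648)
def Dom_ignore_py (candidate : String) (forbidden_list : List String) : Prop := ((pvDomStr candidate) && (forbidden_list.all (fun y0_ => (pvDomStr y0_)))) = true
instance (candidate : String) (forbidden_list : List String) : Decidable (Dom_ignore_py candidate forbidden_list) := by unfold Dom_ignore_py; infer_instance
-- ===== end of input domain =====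

-- B replaces A's three-phase scheme (build start/end lists, three scans) with one any() pass testing each pattern directly; objective: simpler.


-- ===== PORT A =====
-- literal transliteration: build start_list/end_list in one foldl, then
-- res = candidate in forbidden_list, then OR-fold startswith over start_list and endswith over end_list
-- one iteration of A's parsing loop (appends to start_list = .1 / end_list = .2)
def ignore_step (p : List String × List String) (item : String) : List String × List String :=
  let p := if PySem.Str.startswith item "*" then (p.1, p.2 ++ [PySem.Str.replace item "*" ""]) else p
  if PySem.Str.endswith item "*" then (p.1 ++ [PySem.Str.replace item "*" ""], p.2) else p

def ignore_py (candidate : String) (forbidden_list : List String) : Bool :=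
  let lists : List String × List String := forbidden_list.foldl ignore_step ([], [])
  let res := forbidden_list.contains candidate
  let res := lists.1.foldl (fun r item => r || PySem.Str.startswith candidate item) res
  lists.2.foldl (fun r item => r || PySem.Str.endswith candidate item) res

-- ===== PORT B =====
def ignore_matches (candidate item : String) : Bool :=
  let stripped := PySem.Str.replace item "*" ""
  item == candidate
    || (PySem.Str.startswith item "*" && PySem.Str.endswith candidate stripped)
    || (PySem.Str.endswith item "*" && PySem.Str.startswith candidate stripped)

def ignore_py_alt (candidate : String) (forbidden_list : List String) : Bool :=
  forbidden_list.any (fun item => ignore_matches candidate item)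

-- ===== PRECONDITION & SPEC =====
def Spec_ignore_py (candidate : String) (forbidden_list : List String) (out : Bool) : Prop := out = ignore_py_alt candidate forbidden_list
instance (candidate : String) (forbidden_list : List String) (out : Bool) : Decidable (Spec_ignore_py candidate forbidden_list out) := by unfold Spec_ignore_py; infer_instance

-- ===== CLAIM (what is proved, stated in full; the proofs are below) =====
def Claim_equal_ignore_py : Prop := ∀ (candidate : String) (forbidden_list : List String), Dom_ignore_py candidate forbidden_list → Spec_ignore_py candidate forbidden_list (ignore_py candidate forbidden_list)

-- ===== LEMMAS AND PROOFS =====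

-- an OR-accumulating foldl is `r || any`
lemma foldl_or_any (p : String → Bool) (l : List String) (r : Bool) :
    l.foldl (fun r item => r || p item) r = (r || l.any p) := by
  induction l generalizing r with
  | nil => simp
  | cons x xs ih => simp [List.foldl_cons, ih, Bool.or_assoc]

-- the list-building foldl appends the filtered/mapped patterns
lemma build_lists (fl : List String) (p : List String × List String) :
    fl.foldl ignore_step p
    = (p.1 ++ (fl.filter (fun i => PySem.Str.endswith i "*")).map (fun i => PySem.Str.replace i "*" ""),
       p.2 ++ (fl.filter (fun i => PySem.Str.startswith i "*")).map (fun i => PySem.Str.replace i "*" "")) := by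
  induction fl generalizing p with
  | nil => simp
  | cons x xs ih =>
    rw [List.foldl_cons, ih]
    by_cases hs : PySem.Chars.startswith x.toList ['*'] = true <;>
      by_cases he : PySem.Chars.endswith x.toList ['*'] = true <;>
      simp [ignore_step, hs, he]

-- ===== VERDICT (by name: the statement is the Claim_ definition above) =====
theorem ignore_py_spec : Claim_equal_ignore_py := by
  intro candidate fl _
  unfold Spec_ignore_py ignore_py ignore_py_alt
  rw [build_lists fl ([], [])]
  simp only [List.nil_append]
  rw [foldl_or_any, foldl_or_any]
  rw [Bool.eq_iff_iff]
  simp only [ignore_matches, Bool.or_eq_true, Bool.and_eq_true, List.any_eq_true,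
    List.mem_map, List.mem_filter, beq_iff_eq, List.contains_eq_mem, decide_eq_true_eq]
  constructor
  · rintro ((h | ⟨i, ⟨a, ⟨ha, hp⟩, rfl⟩, hq⟩) | ⟨i, ⟨a, ⟨ha, hp⟩, rfl⟩, hq⟩)
    · exact ⟨candidate, h, Or.inl (Or.inl rfl)⟩
    · exact ⟨a, ha, Or.inr ⟨hp, hq⟩⟩
    · exact ⟨a, ha, Or.inl (Or.inr ⟨hp, hq⟩)⟩
  · rintro ⟨i, hi, ((h | ⟨hp, hq⟩) | ⟨hp, hq⟩)⟩
    · exact Or.inl (Or.inl (h ▸ hi))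
    · exact Or.inr ⟨_, ⟨i, ⟨hi, hp⟩, rfl⟩, hq⟩
    · exact Or.inl (Or.inr ⟨_, ⟨i, ⟨hi, hp⟩, rfl⟩, hq⟩)
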